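-- pv_equiv track=rewrite | github.com/knitty-kim/ProgrammersSolvingCode | 프로그래머스/0/120843. 공 던지기/공 던지기.py | solution
-- ===== SOURCE A (Python) =====
-- def solution(numbers, k):
--     n = len(numbers)
--     if n % 2 == 0:
--         arr = [numbers[i] for i in range(len(numbers)) if i % 2 == 0]
--         while k > len(arr):
--             k %= len(arr)
--         return arr[k-1]
--     else:
--         numbers.extend(numbers)
--         arr2 = [numbers[i] for i in range(len(numbers)) if i % 2 == 0]
--         while k > len(arr2):
--             k %= len(arr2)
--         return arr2[k - 1]
-- ===== SOURCE B (Python) =====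
-- def solution(numbers, k):
--     # Closed form: the k-th receiver is two steps around the circle per throw.
--     return numbers[(2 * (k - 1)) % len(numbers)]
-- ===== Notes on version B (the rewrite author's own statement) =====
-- stated objective: faster
-- what changed: Replaces A's list-comprehension simulation (building the even-indexed receiver list, then a while-loop modulo reduction and a wrapped index) by the O(1) closed form numbers[(2*(k-1)) % len(numbers)]; B also does not mutate numbers (A extends it in place when len is odd).
import Mathlib
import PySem

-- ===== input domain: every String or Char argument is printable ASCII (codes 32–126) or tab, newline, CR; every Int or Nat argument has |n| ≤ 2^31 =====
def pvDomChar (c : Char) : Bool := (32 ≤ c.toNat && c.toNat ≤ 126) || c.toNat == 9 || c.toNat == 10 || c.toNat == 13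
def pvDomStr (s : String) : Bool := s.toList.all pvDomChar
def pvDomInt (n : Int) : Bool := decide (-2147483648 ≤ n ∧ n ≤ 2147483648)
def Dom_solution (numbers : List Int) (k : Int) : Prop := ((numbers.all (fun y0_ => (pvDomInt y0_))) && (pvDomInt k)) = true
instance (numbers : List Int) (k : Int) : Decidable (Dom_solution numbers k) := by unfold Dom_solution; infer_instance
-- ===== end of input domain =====

-- B replaces A's receiver-list building and while-loop modulo simulation by the
-- closed form numbers[(2*(k-1)) % len(numbers)]; equivalence is about the RETURN
-- value only (A mutates numbers in place via extend when its length is odd, B does not).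

-- ===== PORT A =====
-- 'while k > len(arr): k %= len(arr)'; the m ≤ 0 branch models the ZeroDivisionError
-- input (empty list, excluded by Pre_) by returning k unchanged.
def pyWhileMod (k m : Int) : Int :=
  if m < k then
    if m ≤ 0 then k
    else pyWhileMod (PySem.Int.mod k m) m
  else k
termination_by (k - m).toNat
decreasing_by
  have h1 := PySem.Int.mod_lt (a := k) (b := m) (by omega)
  omega

def solution (numbers : List Int) (k : Int) : Int :=
  let n : Int := PySem.List.len numbers
  if PySem.Int.mod n 2 == 0 then
    let arr := ((PySem.List.pyRange 0 n 1).filter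
        (fun i => PySem.Int.mod i 2 == 0)).map (fun i => PySem.List.pyGetD numbers i 0)
    let k' := pyWhileMod k (PySem.List.len arr)
    PySem.List.pyGetD arr (k' - 1) 0
  else
    let numbers2 := numbers ++ numbers
    let arr2 := ((PySem.List.pyRange 0 (PySem.List.len numbers2) 1).filter
        (fun i => PySem.Int.mod i 2 == 0)).map (fun i => PySem.List.pyGetD numbers2 i 0)
    let k' := pyWhileMod k (PySem.List.len arr2)
    PySem.List.pyGetD arr2 (k' - 1) 0

-- ===== PORT B =====
def solution_alt (numbers : List Int) (k : Int) : Int :=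
  PySem.List.pyGetD numbers (PySem.Int.mod (2 * (k - 1)) (PySem.List.len numbers)) 0

-- ===== PRECONDITION & SPEC =====
-- Pre_ excludes exactly the inputs on which A raises: the empty list
-- (ZeroDivisionError) and k < 1 - m (m = n/2 for even n = len(numbers), m = n for
-- odd n), where A's arr[k-1] under-runs the list and raises IndexError.
def Pre_solution (numbers : List Int) (k : Int) : Prop :=
  numbers ≠ [] ∧
  1 - (if numbers.length % 2 = 0 then ((numbers.length : Int)) / 2 else (numbers.length : Int)) ≤ k
instance (numbers : List Int) (k : Int) : Decidable (Pre_solution numbers k) := by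
  unfold Pre_solution; infer_instance
def pvWitness_solution : List Int × Int := ([10, 20, 30, 40], 3)

def Spec_solution (numbers : List Int) (k : Int) (out : Int) : Prop := out = solution_alt numbers k
instance (numbers : List Int) (k : Int) (out : Int) : Decidable (Spec_solution numbers k out) := by unfold Spec_solution; infer_instance

-- ===== CLAIM (what is proved, stated in full; the proofs are below) =====
def Claim_equal_solution : Prop := ∀ (numbers : List Int) (k : Int), Dom_solution numbers k → Pre_solution numbers k → Spec_solution numbers k (solution numbers k)

-- ===== LEMMAS AND PROOFS =====

lemma pyWhileMod_spec (k m : Int) (hm : 0 < m) :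
    pyWhileMod k m = if m < k then k % m else k := by
  rw [pyWhileMod]
  split_ifs with h1 h2
  · omega
  · rw [PySem.Int.mod_eq_emod_of_pos hm, pyWhileMod]
    have := Int.emod_lt_of_pos k hm
    split_ifs with h3
    · omega
    · rfl
  · rfl

-- the even indices of range N, as a map over range ((N+1)/2)
lemma range_filter_even (N : Nat) :
    (List.range N).filter (fun i => i % 2 == 0) = (List.range ((N + 1) / 2)).map (2 * ·) := by
  induction N with
  | zero => simp
  | succ N ih =>
    rw [List.range_succ, List.filter_append, ih]
    rcases Nat.even_or_odd N with h | h
    · obtain ⟨j, hj⟩ := h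
      have h2 : (N + 1 + 1) / 2 = (N + 1) / 2 + 1 := by omega
      rw [h2, List.range_succ, List.map_append]
      simp only [List.filter_cons, List.filter_nil]
      have hN : (N % 2 == 0) = true := by simp; omega
      simp only [hN, if_true, List.map_cons, List.map_nil]
      congr 2
      omega
    · obtain ⟨j, hj⟩ := h
      have h2 : (N + 1 + 1) / 2 = (N + 1) / 2 := by omega
      rw [h2]
      have hN : (N % 2 == 0) = false := by simp; omega
      simp [hN]

-- the comprehension in port A, fully characterised
lemma arr_eq (xs : List Int) (N : Nat) :
    ((PySem.List.pyRange 0 (N : Int) 1).filter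
        (fun i => PySem.Int.mod i 2 == 0)).map (fun i => PySem.List.pyGetD xs i 0)
    = (List.range ((N + 1) / 2)).map (fun j => xs.getD (2 * j) 0) := by
  rw [PySem.List.pyRange_zero_natCast, List.filter_map, List.map_map]
  have h1 : ((fun i => PySem.Int.mod i 2 == 0) ∘ (Nat.cast : Nat → Int))
       = fun i : Nat => i % 2 == 0 := by
    funext i
    simp [Function.comp]
    omega
  rw [h1, range_filter_even, List.map_map]
  apply List.map_congr_left
  intro j _
  simp only [Function.comp]
  rw [PySem.List.pyGetD_natCast]

-- indexing with a possibly-negative in-range index is indexing at the index mod length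
lemma pyGetD_wrap (xs : List Int) (i : Int) (h1 : -(xs.length : Int) ≤ i)
    (h2 : i < (xs.length : Int)) :
    PySem.List.pyGetD xs i 0 = xs.getD ((i % (xs.length : Int)).toNat) 0 := by
  have hlen : 0 < xs.length := by omega
  by_cases hi : 0 ≤ i
  · rw [PySem.List.pyGetD_eq_getElem _ _ hi h2,
        Int.emod_eq_of_lt hi h2, List.getD_eq_getElem xs 0 (by omega)]
  · set k0 : Nat := (-i).toNat with hk0
    have hik : i = -(k0 : Int) := by omega
    rw [hik, PySem.List.pyGetD_neg_natCast xs k0 0 (by omega) (by omega)]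
    have hmod : -(k0 : Int) % (xs.length : Int) = (xs.length : Int) - k0 := by
      have h4 : -(k0 : Int) = ((xs.length : Int) - k0) - xs.length := by ring
      rw [h4, Int.sub_emod_right]
      exact Int.emod_eq_of_lt (by omega) (by omega)
    rw [hmod, List.getD_eq_getElem xs 0 (by omega)]
    congr 1
    omega

-- A's while-loop followed by arr[k-1] equals indexing at (k-1) mod len
lemma while_index (arr : List Int) (k : Int) (h0 : arr ≠ [])
    (hk : 1 - (arr.length : Int) ≤ k) :
    PySem.List.pyGetD arr (pyWhileMod k ((arr.length : Int)) - 1) 0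
    = arr.getD (((k - 1) % (arr.length : Int)).toNat) 0 := by
  have hlen : 0 < arr.length := List.length_pos_iff.mpr h0
  rw [pyWhileMod_spec k _ (by omega)]
  split_ifs with h
  · have h1 := Int.emod_nonneg k (b := (arr.length : Int)) (by omega)
    have h2 := Int.emod_lt_of_pos k (b := (arr.length : Int)) (by omega)
    rw [pyGetD_wrap arr _ (by omega) (by omega)]
    congr 2
    rw [Int.sub_emod (k % (arr.length : Int)) 1 (arr.length : Int),
        Int.emod_emod_of_dvd k dvd_rfl, ← Int.sub_emod]
  · exact pyGetD_wrap arr _ (by omega) (by omega)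

-- B, rewritten through getD at the (nonnegative) Python-mod index
lemma alt_eq (numbers : List Int) (k : Int) (h0 : numbers ≠ []) :
    solution_alt numbers k
    = numbers.getD ((2 * (k - 1) % (numbers.length : Int)).toNat) 0 := by
  have hlen : 0 < numbers.length := List.length_pos_iff.mpr h0
  unfold solution_alt
  rw [PySem.List.len_eq, PySem.Int.mod_eq_emod_of_pos (by omega)]
  have h1 := Int.emod_nonneg (2 * (k - 1)) (b := (numbers.length : Int)) (by omega)
  have h2 := Int.emod_lt_of_pos (2 * (k - 1)) (b := (numbers.length : Int)) (by omega)
  rw [PySem.List.pyGetD_eq_getElem _ _ h1 h2, List.getD_eq_getElem _ 0 (by omega)]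

-- doubling the list then taking every second element reads numbers at (2*j) mod N
lemma double_getD (numbers : List Int) (j : Nat) (hj : j < numbers.length) :
    (numbers ++ numbers).getD (2 * j) 0 = numbers.getD ((2 * j) % numbers.length) 0 := by
  set N := numbers.length with hN
  have hlen : (numbers ++ numbers).length = N + N := by simp [hN]
  by_cases h : 2 * j < N
  · rw [Nat.mod_eq_of_lt h]
    rw [List.getD_eq_getElem _ 0 (by omega), List.getD_eq_getElem _ 0 (by omega)]
    exact List.getElem_append_left ..
  · have hm : (2 * j) % N = 2 * j - N := by
      rw [Nat.mod_eq_sub_mod (by omega), Nat.mod_eq_of_lt (by omega)]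
    rw [hm]
    rw [List.getD_eq_getElem _ 0 (by omega), List.getD_eq_getElem _ 0 (by omega)]
    rw [List.getElem_append_right (by omega)]

-- ===== VERDICT (by name: the statement is the Claim_ definition above) =====
theorem solution_spec : Claim_equal_solution := by
  intro numbers k _ hpre
  obtain ⟨h0, hk⟩ := hpre
  unfold Spec_solution
  have hlen : 0 < numbers.length := List.length_pos_iff.mpr h0
  set N := numbers.length with hN
  by_cases hpar : N % 2 = 0
  · -- even length: arr reads numbers at even positions, length N/2
    rw [if_pos hpar] at hk
    have hc : (PySem.Int.mod ((N : Int)) 2 == 0) = true := by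
      have h5 := PySem.Int.mod_natCast N 2
      simp
      omega
    rw [solution]
    simp only [PySem.List.len_eq, ← hN]
    rw [if_pos hc, arr_eq numbers N]
    set M := (N + 1) / 2 with hM
    set f : Nat → Int := fun j => numbers.getD (2 * j) 0 with hf
    have hM2 : N = 2 * M := by omega
    have hml : ((List.range M).map f).length = M := by simp
    rw [while_index _ k (by simp [hf]; omega) (by rw [hml]; omega)]
    rw [hml, alt_eq numbers k h0]
    have e1 := Int.emod_nonneg (k - 1) (b := (M : Int)) (by omega)
    have e2 := Int.emod_lt_of_pos (k - 1) (b := (M : Int)) (by omega)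
    rw [PySem.List.getD_map_range f _ _ _ (by omega)]
    simp only [hf, ← hN]
    congr 1
    have e3 : 2 * (k - 1) % (N : Int) = 2 * ((k - 1) % (M : Int)) := by
      rw [show ((N : Int)) = 2 * (M : Int) by exact_mod_cast congrArg Nat.cast hM2]
      exact Int.mul_emod_mul_of_pos _ _ (by norm_num)
    rw [e3]
    omega
  · -- odd length: the doubled list's even positions read numbers at (2*j) mod N
    rw [if_neg hpar] at hk
    have hc : ¬ ((PySem.Int.mod ((N : Int)) 2 == 0) = true) := by
      have h5 := PySem.Int.mod_natCast N 2
      simp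
      omega
    rw [solution]
    simp only [PySem.List.len_eq, ← hN]
    rw [if_neg hc]
    have hl2 : (numbers ++ numbers).length = N + N := by simp [← hN]
    rw [hl2, arr_eq (numbers ++ numbers) (N + N),
        show (N + N + 1) / 2 = N from by omega]
    set f : Nat → Int := fun j => (numbers ++ numbers).getD (2 * j) 0 with hf
    have hml : ((List.range N).map f).length = N := by simp
    rw [while_index _ k (by simp [hf]; omega) (by rw [hml]; omega)]
    rw [hml, alt_eq numbers k h0]
    have e1 := Int.emod_nonneg (k - 1) (b := (N : Int)) (by omega)
    have e2 := Int.emod_lt_of_pos (k - 1) (b := (N : Int)) (by omega)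
    rw [PySem.List.getD_map_range f _ _ _ (by omega)]
    set j : Nat := ((k - 1) % (N : Int)).toNat with hj
    simp only [hf]
    rw [double_getD numbers j (by omega)]
    simp only [← hN]
    congr 1
    have e3 : (2 * ((k - 1) % (N : Int))) % (N : Int) = 2 * (k - 1) % (N : Int) := by
      conv_lhs => rw [Int.mul_emod]
      conv_rhs => rw [Int.mul_emod]
      rw [Int.emod_emod_of_dvd _ dvd_rfl]
    have h6 := Int.natCast_mod (2 * j) N
    have h7 := Int.emod_nonneg (((2 * j : Nat) : Int)) (b := (N : Int)) (by omega)
    have h8 := Int.emod_nonneg (2 * (k - 1)) (b := (N : Int)) (by omega)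
    have e5 : ((2 * j : Nat) : Int) % (N : Int) = 2 * (k - 1) % (N : Int) := by
      have h9 : ((2 * j : Nat) : Int) = 2 * ((k - 1) % (N : Int)) := by push_cast; omega
      rw [h9, e3]
    omega
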